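-- pv_equiv track=rewrite | github.com/kashishkap00r/company-chatter | scripts/build_site.py | _expand_alias_tokens
-- ===== SOURCE A (Python) =====
-- ACRONYM_EXPANSIONS = {
--     "amc": ["asset", "management", "company"],
-- }
--
-- def _expand_alias_tokens(tokens: list[str]) -> list[str]:
--     expanded: list[str] = []
--     for index, token in enumerate(tokens):
--         if token in ACRONYM_EXPANSIONS and index == len(tokens) - 1:
--             expanded.extend(ACRONYM_EXPANSIONS[token])
--         else:
--             expanded.append(token)
--     return expanded
-- ===== SOURCE B (Python) =====
-- ACRONYM_EXPANSIONS = {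
--     "amc": ["asset", "management", "company"],
-- }
--
-- def _expand_alias_tokens(tokens: list[str]) -> list[str]:
--     if tokens and tokens[-1] in ACRONYM_EXPANSIONS:
--         return list(tokens[:-1]) + ACRONYM_EXPANSIONS[tokens[-1]]
--     return list(tokens)
-- ===== Notes on version B (the rewrite author's own statement) =====
-- stated objective: simpler
-- what changed: Replaces the enumerate loop with its per-index last-position guard by a direct last-element dispatch: slice off the tail and append its expansion if it is an acronym key, else copy the list.
import Mathlib
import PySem

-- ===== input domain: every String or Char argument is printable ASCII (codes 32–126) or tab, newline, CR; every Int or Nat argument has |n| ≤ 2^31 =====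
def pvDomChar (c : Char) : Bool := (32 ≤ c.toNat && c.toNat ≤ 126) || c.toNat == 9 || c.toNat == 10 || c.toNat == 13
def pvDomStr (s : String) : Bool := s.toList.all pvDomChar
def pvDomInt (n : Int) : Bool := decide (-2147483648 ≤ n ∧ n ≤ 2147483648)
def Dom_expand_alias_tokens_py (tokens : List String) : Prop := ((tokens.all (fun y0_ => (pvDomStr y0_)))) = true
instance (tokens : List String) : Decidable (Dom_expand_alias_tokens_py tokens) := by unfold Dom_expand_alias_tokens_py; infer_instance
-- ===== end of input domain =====

-- B replaces A's enumerate loop (with its index == len-1 guard) by a direct last-element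
-- dispatch over tokens[:-1] / tokens[-1]; objective: simpler.

-- ===== PORT A =====
def ACRONYM_EXPANSIONS : PySem.Dict String (List String) :=
  PySem.Dict.ofList [("amc", ["asset", "management", "company"])]

-- literal port of A: for index, token in enumerate(tokens): append or extend
def expand_alias_tokens_py (tokens : List String) : List String :=
  (PySem.List.enumerate tokens).foldl
    (fun expanded p =>
      if ACRONYM_EXPANSIONS.contains p.2 && (p.1 == (tokens.length : Int) - 1) then
        expanded ++ ACRONYM_EXPANSIONS.getD p.2 []   -- getD: key is present when this branch runs
      else
        expanded ++ [p.2]) []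

-- ===== PORT B =====
-- literal port of B: tail dispatch on tokens[-1]
def expand_alias_tokens_py_alt (tokens : List String) : List String :=
  match tokens.getLast? with
  | none => tokens
  | some t =>
    match ACRONYM_EXPANSIONS.get? t with
    | some exp => tokens.dropLast ++ exp
    | none => tokens

-- ===== PRECONDITION & SPEC =====
def Spec_expand_alias_tokens_py (tokens : List String) (out : List String) : Prop := out = expand_alias_tokens_py_alt tokens
instance (tokens : List String) (out : List String) : Decidable (Spec_expand_alias_tokens_py tokens out) := by unfold Spec_expand_alias_tokens_py; infer_instance

-- ===== CLAIM (what is proved, stated in full; the proofs are below) =====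
def Claim_equal_expand_alias_tokens_py : Prop := ∀ (tokens : List String), Dom_expand_alias_tokens_py tokens → Spec_expand_alias_tokens_py tokens (expand_alias_tokens_py tokens)

-- ===== LEMMAS AND PROOFS =====

-- On every pair of enumerate xs (a strict prefix of the loop), the index test is false,
-- so the loop body is a plain append.
theorem expandA_concat (xs : List String) (x : String) :
    expand_alias_tokens_py (xs ++ [x]) =
      xs ++ (if ACRONYM_EXPANSIONS.contains x then ACRONYM_EXPANSIONS.getD x [] else [x]) := by
  unfold expand_alias_tokens_py
  rw [PySem.List.enumerate_append, List.foldl_append]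
  have hpre : ∀ (acc : List String) (p : Int × String), p ∈ PySem.List.enumerate xs →
      (if ACRONYM_EXPANSIONS.contains p.2 && (p.1 == ((xs ++ [x]).length : Int) - 1) then
        acc ++ ACRONYM_EXPANSIONS.getD p.2 []
      else acc ++ [p.2]) = acc ++ [p.2] := by
    intro acc p hp
    rcases (PySem.List.mem_enumerate_iff xs 0 p).1 hp with ⟨k, hk, rfl⟩
    have hne : ¬ (((0 : Int) + k == ((xs ++ [x]).length : Int) - 1) = true) := by
      simp [List.length_append]
      omega
    rw [if_neg (by simp only [Bool.and_eq_true]; intro h; exact hne h.2)]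
  rw [PySem.List.foldl_congr_mem _ _ _ _ hpre]
  rw [show (fun (acc : List String) (p : Int × String) => acc ++ [p.2])
        = (fun (acc : List String) (p : Int × String) => acc ++ [(fun q : Int × String => q.2) p]) from rfl,
      PySem.List.foldl_append_singleton_eq_map, PySem.List.map_snd_enumerate]
  simp only [PySem.List.enumerate_cons, PySem.List.enumerate_nil, List.foldl_cons, List.foldl_nil,
    List.nil_append]
  have hcond : (((0 : Int) + xs.length == ((xs ++ [x]).length : Int) - 1)) = true := by
    simp [List.length_append]
  simp only [hcond, Bool.and_true]
  split_ifs <;> simp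

theorem expand_eq (tokens : List String) :
    expand_alias_tokens_py tokens = expand_alias_tokens_py_alt tokens := by
  rcases List.eq_nil_or_concat tokens with rfl | ⟨xs, x, rfl⟩
  · rfl
  · rw [List.concat_eq_append, expandA_concat]
    unfold expand_alias_tokens_py_alt
    rw [List.getLast?_concat, List.dropLast_concat]
    by_cases hx : x = "amc"
    · subst hx
      have hc : ACRONYM_EXPANSIONS.contains "amc" = true := by decide
      have hg : ACRONYM_EXPANSIONS.get? "amc" = some ["asset", "management", "company"] := by decide
      have hd : ACRONYM_EXPANSIONS.getD "amc" [] = ["asset", "management", "company"] := by decide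
      simp [hg, hc, hd]
    · have hb : (("amc" : String) == x) = false := by
        simp; intro h; exact hx h.symm
      have h1 : ACRONYM_EXPANSIONS.contains x = false := by
        simp [ACRONYM_EXPANSIONS, PySem.Dict.contains, PySem.Dict.ofList, PySem.Dict.empty,
          PySem.Dict.update, PySem.Dict.insert, hb]
      have h2 : ACRONYM_EXPANSIONS.get? x = none := by
        simp [ACRONYM_EXPANSIONS, PySem.Dict.get?, PySem.Dict.ofList, PySem.Dict.empty,
          PySem.Dict.update, PySem.Dict.insert, hb]
      simp [h1, h2]

-- ===== VERDICT (by name: the statement is the Claim_ definition above) =====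
theorem expand_alias_tokens_py_spec : Claim_equal_expand_alias_tokens_py := by
  intro tokens _
  unfold Spec_expand_alias_tokens_py
  exact expand_eq tokens
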